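-- pv_equiv track=rewrite | github.com/Ulysses-Alv/freeCodeCamp-budget-app | budget.py | write_Names
-- ===== SOURCE A (Python) =====
-- def write_Names(categories):
--     lista = categories
--     resultado = "\n"
--
--     longitud_maxima = max([len(elemento) for elemento in lista])
--
--     for i in range(longitud_maxima):
--         resultado += "     "
--         for elemento in lista:
--             if i < len(elemento):
--                 resultado += elemento[i]
--             else:
--                 resultado += " "
--             resultado += "  "
--         resultado += "\n"
--     resultado = resultado.rstrip("\n")
--     return resultado
-- ===== SOURCE B (Python) =====
-- def write_Names(categories):
--     longitud_maxima = max([len(elemento) for elemento in categories])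
--     padded = [elemento.ljust(longitud_maxima) for elemento in categories]
--     rows = ["     " + "".join(c + "  " for c in col) for col in zip(*padded)]
--     return ("\n" + "\n".join(rows)).rstrip("\n")
-- ===== Notes on version B (the rewrite author's own statement) =====
-- stated objective: idiomatic
-- what changed: B replaces A's character-by-character accumulation (outer index loop with an i<len bounds check, string += in both loops) by pad-then-transpose: ljust every name to the max length, zip(*padded) to get the columns, build each row by a join over its column, and join the rows with newlines once.
import Mathlib
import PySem

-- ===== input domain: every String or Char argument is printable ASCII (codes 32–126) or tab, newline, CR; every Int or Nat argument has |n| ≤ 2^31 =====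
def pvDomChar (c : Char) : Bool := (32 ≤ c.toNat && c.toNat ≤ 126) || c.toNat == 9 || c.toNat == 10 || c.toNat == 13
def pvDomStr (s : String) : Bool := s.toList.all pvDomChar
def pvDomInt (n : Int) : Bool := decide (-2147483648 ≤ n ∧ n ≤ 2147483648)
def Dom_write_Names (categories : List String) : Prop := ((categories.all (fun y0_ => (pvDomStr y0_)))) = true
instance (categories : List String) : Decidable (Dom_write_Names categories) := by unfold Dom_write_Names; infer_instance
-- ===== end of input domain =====

-- B builds the display by pad-then-transpose (ljust + zip + join) instead of A's
-- indexed loop with a bounds check and incremental string appends; objective: idiomatic.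

-- shared primitive: Python's s.rstrip("\n") on a list of chars (exact: drops trailing '\n's)
def rstripNl (cs : List Char) : List Char :=
  ((cs.reverse.dropWhile (fun c => c == '\n'))).reverse

-- ===== PORT A =====
def write_Names (categories : List String) : String :=
  let lista := categories.map String.toList
  match PySem.List.max? (lista.map (fun elemento => (elemento.length : Int))) (fun x => x) with
  | none => ""   -- unreachable under Pre_: Python's max([]) raises ValueError
  | some longitud_maxima =>
    let resultado : List Char := ['\n']
    let resultado := (PySem.List.pyRange 0 longitud_maxima 1).foldl (fun resultado i =>
      let resultado := resultado ++ "     ".toList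
      let resultado := lista.foldl (fun resultado elemento =>
        (resultado ++ (if i < (elemento.length : Int) then [elemento.getD i.toNat ' '] else [' ']))
          ++ "  ".toList) resultado
      resultado ++ ['\n']) resultado
    String.ofList (rstripNl resultado)

-- ===== PORT B =====
-- Python's zip(*P): emit the heads while every list is nonempty, step to the tails
def pyZipStar (P : List (List Char)) : List (List Char) :=
  if h : P.isEmpty || P.any List.isEmpty then []
  else (P.map (fun p => p.headD ' ')) :: pyZipStar (P.map List.tail)
termination_by (P.headD []).length
decreasing_by
  cases P with
  | nil => simp_all
  | cons q rest =>
    simp only [Bool.or_eq_true, List.isEmpty_iff, List.any_eq_true, not_or] at h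
    obtain ⟨-, h2⟩ := h
    have hq : q ≠ [] := fun hq => h2 ⟨q, List.mem_cons_self .., by simp [hq]⟩
    have : 0 < q.length := List.length_pos_iff.mpr hq
    show ((List.map List.tail (q :: rest)).headD []).length < ((q :: rest).headD []).length
    simp only [List.map_cons, List.headD_cons, List.length_tail]
    omega

def write_Names_alt (categories : List String) : String :=
  let lista := categories.map String.toList
  match PySem.List.max? (lista.map (fun elemento => (elemento.length : Int))) (fun x => x) with
  | none => ""   -- unreachable under Pre_: Python's max([]) raises ValueError
  | some longitud_maxima =>
    let padded := lista.map (fun elemento =>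
      elemento ++ List.replicate (longitud_maxima.toNat - elemento.length) ' ')
    let rows := (pyZipStar padded).map (fun col =>
      "     ".toList ++ col.flatMap (fun c => [c, ' ', ' ']))
    String.ofList (rstripNl ('\n' :: List.intercalate ['\n'] rows))

-- ===== PRECONDITION & SPEC =====
-- Pre_ excludes only an empty categories list, on which A's max over the name lengths raises ValueError (B raises there too).
def Pre_write_Names (categories : List String) : Prop := categories ≠ []
instance (categories : List String) : Decidable (Pre_write_Names categories) := by
  unfold Pre_write_Names; infer_instance
def pvWitness_write_Names : List String := ["food", "tv"]

def Spec_write_Names (categories : List String) (out : String) : Prop := out = write_Names_alt categories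
instance (categories : List String) (out : String) : Decidable (Spec_write_Names categories out) := by unfold Spec_write_Names; infer_instance

-- ===== CLAIM (what is proved, stated in full; the proofs are below) =====
def Claim_equal_write_Names : Prop := ∀ (categories : List String), Dom_write_Names categories → Pre_write_Names categories → Spec_write_Names categories (write_Names categories)

-- ===== LEMMAS AND PROOFS =====

-- what A appends for one name in row i (its character or a space, then two spaces)
def pvCol (i : Int) (e : List Char) : List Char :=
  (if i < (e.length : Int) then [e.getD i.toNat ' '] else [' ']) ++ "  ".toList

lemma pv_inner (L : List (List Char)) (i : Int) (res : List Char) :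
    L.foldl (fun res e =>
        (res ++ (if i < (e.length : Int) then [e.getD i.toNat ' '] else [' '])) ++ "  ".toList) res
      = res ++ L.flatMap (pvCol i) := by
  induction L generalizing res with
  | nil => simp
  | cons e t ih =>
    rw [List.foldl_cons, ih]
    simp [pvCol, List.append_assoc]

lemma pv_outer (L : List (List Char)) (is : List Int) (init : List Char) :
    is.foldl (fun res i =>
        (L.foldl (fun res e =>
            (res ++ (if i < (e.length : Int) then [e.getD i.toNat ' '] else [' '])) ++ "  ".toList)
          (res ++ "     ".toList)) ++ ['\n']) init
      = init ++ is.flatMap (fun i => "     ".toList ++ L.flatMap (pvCol i) ++ ['\n']) := by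
  induction is generalizing init with
  | nil => simp
  | cons i t ih =>
    rw [List.foldl_cons, pv_inner, ih]
    simp [List.append_assoc]

lemma pv_castmax (t : List Nat) (x : Nat) :
    (t.map (fun n : Nat => (n : Int))).foldl max (x : Int) = ((t.foldl max x : Nat) : Int) := by
  induction t generalizing x with
  | nil => rfl
  | cons n t ih => rw [List.map_cons, List.foldl_cons, ← Nat.cast_max, ih]; rfl

lemma pv_le_foldl_max (t : List Nat) (x : Nat) :
    x ≤ t.foldl max x ∧ ∀ y ∈ t, y ≤ t.foldl max x := by
  induction t generalizing x with
  | nil => simp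
  | cons n t ih =>
    refine ⟨le_trans (le_max_left x n) (ih (max x n)).1, ?_⟩
    intro y hy
    rcases List.mem_cons.mp hy with rfl | hy
    · exact le_trans (le_max_right x y) (ih (max x y)).1
    · exact (ih (max x n)).2 y hy

lemma pv_pad_get (e : List Char) (N k : Nat) :
    (e ++ List.replicate (N - e.length) ' ').getD k ' '
      = if (k : Int) < (e.length : Int) then e.getD k ' ' else ' ' := by
  split_ifs with h
  · have hk : k < e.length := by exact_mod_cast h
    simp [List.getD_eq_getElem?_getD, List.getElem?_append_left hk]
  · have hk : e.length ≤ k := by exact_mod_cast not_lt.mp h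
    simp only [List.getD_eq_getElem?_getD, List.getElem?_append_right hk, List.getElem?_replicate]
    split <;> rfl

lemma pv_tail_getD (p : List Char) (i : Nat) : p.tail.getD i ' ' = p.getD (i + 1) ' ' := by
  cases p <;> rfl

lemma pv_headD (p : List Char) : p.headD ' ' = p.getD 0 ' ' := by cases p <;> rfl

lemma pv_zip (m : Nat) : ∀ (P : List (List Char)), P ≠ [] → (∀ p ∈ P, p.length = m) →
    pyZipStar P = (List.range m).map (fun i => P.map (fun p => p.getD i ' ')) := by
  induction m with
  | zero =>
    intro P hne hlen
    rw [pyZipStar]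
    have hany : P.any List.isEmpty = true := by
      cases P with
      | nil => exact absurd rfl hne
      | cons q t =>
        simp only [List.any_cons, Bool.or_eq_true]
        exact Or.inl (List.isEmpty_iff.mpr (List.length_eq_zero_iff.mp (hlen q (by simp))))
    simp [hany]
  | succ m ih =>
    intro P hne hlen
    rw [pyZipStar]
    have h1 : P.isEmpty = false := by simpa [List.isEmpty_iff] using hne
    have h2 : P.any List.isEmpty = false := by
      simp only [List.any_eq_false]
      intro p hp hpe
      have := hlen p hp
      rw [List.isEmpty_iff.mp hpe] at this
      simp at this
    rw [dif_neg (by simp [h1, h2])]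
    rw [ih (P.map List.tail) (by simpa using hne)
        (fun p hp => by
          obtain ⟨q, hq, rfl⟩ := List.mem_map.mp hp
          have := hlen q hq
          simp [List.length_tail, this])]
    rw [List.range_succ_eq_map, List.map_cons]
    congr 1
    · exact List.map_congr_left (fun p _ => pv_headD p)
    · rw [List.map_map]
      refine List.map_congr_left (fun i _ => ?_)
      rw [List.map_map]
      exact List.map_congr_left (fun p _ => by
        simp only [Function.comp_apply]
        exact pv_tail_getD p i)

lemma pv_col_pad (e : List Char) (N k : Nat) :
    [(e ++ List.replicate (N - e.length) ' ').getD k ' ', ' ', ' '] = pvCol (k : Int) e := by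
  rw [pv_pad_get]
  simp only [pvCol, Int.toNat_natCast]
  split_ifs <;> rfl

lemma pv_rows (ys : List String) (N : Nat) :
    (List.range N).map (fun i : Nat => "     ".toList ++
        List.flatMap (fun c => [c, ' ', ' '])
          (ys.map (fun x => (x.toList ++ List.replicate (N - x.toList.length) ' ').getD i ' ')))
      = (List.range N).map (fun i : Nat =>
          "     ".toList ++ List.flatMap (pvCol ((i : Nat) : Int)) (ys.map String.toList)) := by
  refine List.map_congr_left (fun k _ => ?_)
  congr 1
  rw [List.flatMap_map, List.flatMap_map]
  refine List.flatMap_congr (fun x _ => ?_)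
  exact pv_col_pad x.toList N k

lemma pv_flat_inter (rows : List (List Char)) (hne : rows ≠ []) :
    rows.flatMap (fun r => r ++ ['\n']) = List.intercalate ['\n'] rows ++ ['\n'] := by
  induction rows with
  | nil => exact absurd rfl hne
  | cons r t ih =>
    cases t with
    | nil => simp [List.intercalate]
    | cons s u => simp_all [List.intercalate, List.intersperse]

lemma pv_rstrip (x : List Char) : rstripNl (x ++ ['\n']) = rstripNl x := by
  simp [rstripNl]

lemma pv_final (R : Nat → List Char) (N : Nat) :
    rstripNl (['\n'] ++ (List.range N).flatMap (fun a => R a ++ ['\n']))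
      = rstripNl ('\n' :: List.intercalate ['\n'] ((List.range N).map R)) := by
  cases N with
  | zero => rfl
  | succ n =>
    have hne : (List.range (n + 1)).map R ≠ [] := by simp
    rw [← List.flatMap_map R (fun r => r ++ ['\n']) (List.range (n + 1)),
        pv_flat_inter _ hne,
        show ['\n'] ++ (List.intercalate ['\n'] ((List.range (n + 1)).map R) ++ ['\n'])
            = ('\n' :: List.intercalate ['\n'] ((List.range (n + 1)).map R)) ++ ['\n'] by simp,
        pv_rstrip]

-- ===== VERDICT (by name: the statement is the Claim_ definition above) =====
theorem write_Names_spec : Claim_equal_write_Names := by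
  intro categories _ hpre
  unfold Pre_write_Names at hpre
  unfold Spec_write_Names
  obtain ⟨s, ss, rfl⟩ : ∃ s ss, categories = s :: ss := by
    cases categories with
    | nil => exact absurd rfl hpre
    | cons s ss => exact ⟨s, ss, rfl⟩
  have hmax : PySem.List.max? (((s :: ss).map String.toList).map
      (fun elemento => ((elemento.length : Nat) : Int))) (fun x => x)
      = some (((ss.map (fun x => x.toList.length)).foldl max s.toList.length : Nat) : Int) := by
    rw [List.map_cons, List.map_cons, List.map_map, PySem.List.max?_id_cons]
    have h := pv_castmax (ss.map (fun x => x.toList.length)) s.toList.length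
    rw [List.map_map] at h
    exact congrArg some h
  simp only [write_Names, write_Names_alt, hmax]
  rw [PySem.List.pyRange_zero_nat, pv_outer, List.flatMap_map]
  -- abbreviations
  have hle : ∀ e ∈ (s :: ss).map String.toList,
      e.length ≤ (ss.map (fun x => x.toList.length)).foldl max s.toList.length := by
    intro e he
    rcases List.mem_map.mp he with ⟨x, hx, rfl⟩
    rcases List.mem_cons.mp hx with rfl | hx
    · exact (pv_le_foldl_max _ _).1
    · exact (pv_le_foldl_max _ _).2 _ (List.mem_map.mpr ⟨x, hx, rfl⟩)
  have hzip := pv_zip ((ss.map (fun x => x.toList.length)).foldl max s.toList.length)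
      (((s :: ss).map String.toList).map (fun elemento =>
        elemento ++ List.replicate
          ((((ss.map (fun x => x.toList.length)).foldl max s.toList.length : Nat) : Int).toNat
            - elemento.length) ' '))
      (by simp)
      (by
        intro p hp
        rcases List.mem_map.mp hp with ⟨e, he, rfl⟩
        simp only [List.length_append, List.length_replicate, Int.toNat_natCast]
        have := hle e he
        omega)
  rw [hzip, List.map_map, List.map_map]
  simp only [Function.comp_def, List.map_map, Int.toNat_natCast]
  rw [pv_rows (s :: ss) (List.foldl max s.toList.length (List.map (fun x => x.toList.length) ss))]
  exact congrArg String.ofList (pv_final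
    (fun i : Nat => "     ".toList ++ List.flatMap (pvCol (i : Int)) (List.map String.toList (s :: ss)))
    (List.foldl max s.toList.length (List.map (fun x => x.toList.length) ss)))
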